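-- pv_equiv track=rewrite | github.com/SengerM/TI-LGAD_analysis_scripts | utils.py | interlace
-- ===== SOURCE A (Python) =====
-- def interlace(lst):
-- 	# https://en.wikipedia.org/wiki/Interlacing_(bitmaps)
-- 	lst = sorted(lst)[::-1]
-- 	result = [lst[0], lst[-1]]
-- 	ranges = [(1, len(lst) - 1)]
-- 	for start, stop in ranges:
-- 		if start < stop:
-- 			middle = (start + stop) // 2
-- 			result.append(lst[middle])
-- 			ranges += (start, middle), (middle + 1, stop)
-- 	return result
-- ===== SOURCE B (Python) =====
-- def interlace(lst):
-- 	# https://en.wikipedia.org/wiki/Interlacing_(bitmaps)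
-- 	lst = sorted(lst)[::-1]
-- 	n = len(lst)
-- 	depth = {}
-- 	def assign(s, t, d):
-- 		if s < t:
-- 			m = (s + t) // 2
-- 			depth[m] = d
-- 			assign(s, m, d + 1)
-- 			assign(m + 1, t, d + 1)
-- 	assign(1, n - 1, 0)
-- 	result = [lst[0], lst[-1]]
-- 	for i in sorted(depth, key=lambda i: depth[i] * n + i):
-- 		result.append(lst[i])
-- 	return result
-- ===== Notes on version B (the rewrite author's own statement) =====
-- stated objective: alternative
-- what changed: A emits midpoints by iterating a self-growing FIFO queue of ranges (BFS order); B instead assigns each midpoint its depth by a depth-first recursion into a dict and then obtains the output order by sorting the indices with key depth*n+index, so no queue or level traversal exists in B.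
import Mathlib
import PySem

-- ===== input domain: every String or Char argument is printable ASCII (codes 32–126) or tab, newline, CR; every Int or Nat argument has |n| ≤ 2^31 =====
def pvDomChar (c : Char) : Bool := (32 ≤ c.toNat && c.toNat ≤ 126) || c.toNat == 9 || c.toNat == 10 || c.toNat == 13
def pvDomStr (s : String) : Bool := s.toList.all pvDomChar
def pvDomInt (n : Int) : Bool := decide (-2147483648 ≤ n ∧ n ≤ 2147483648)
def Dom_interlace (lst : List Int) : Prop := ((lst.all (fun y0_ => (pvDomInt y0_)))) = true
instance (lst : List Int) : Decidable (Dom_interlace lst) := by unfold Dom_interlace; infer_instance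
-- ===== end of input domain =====

-- B replaces A's self-growing FIFO queue by a depth-first recursion that records each
-- midpoint's depth in a dict and a final sort by key depth*n+index (same output, same
-- asymptotic cost; objective: alternative algorithm).

-- termination measure for A's queue recursion
def pvQWeight (q : List (Int × Int)) : Nat :=
  (q.map (fun p => 2 * (p.2 - p.1).toNat + 1)).sum

theorem pvQWeight_nil : pvQWeight [] = 0 := rfl

theorem pvQWeight_cons (a b : Int) (q : List (Int × Int)) :
    pvQWeight ((a, b) :: q) = 2 * (b - a).toNat + 1 + pvQWeight q := by
  simp [pvQWeight]

theorem pvToNatSplit {s m t : Int} (h1 : s ≤ m) (h2 : m < t) :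
    (m - s).toNat + (t - (m + 1)).toNat + 1 = (t - s).toNat := by
  have ha : (0 : Int) ≤ m - s := by omega
  have hb : (0 : Int) ≤ t - (m + 1) := by omega
  have he : t - s = (m - s) + ((t - (m + 1)) + 1) := by ring
  rw [he, Int.toNat_add ha (by omega), Int.toNat_add hb (by omega)]
  exact Nat.add_assoc _ _ _

theorem pvQWeight_append (a b : List (Int × Int)) :
    pvQWeight (a ++ b) = pvQWeight a + pvQWeight b := by
  simp [pvQWeight]

theorem pvMidBounds {s t : Int} (h : s < t) :
    s ≤ PySem.Int.floordiv (s + t) 2 ∧ PySem.Int.floordiv (s + t) 2 < t := by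
  rw [PySem.Int.floordiv_eq_ediv_of_pos (by norm_num)]
  omega

theorem pvDecSplit {s t : Int} (rest : List (Int × Int)) (h : s < t) :
    pvQWeight (rest ++ [(s, PySem.Int.floordiv (s + t) 2), (PySem.Int.floordiv (s + t) 2 + 1, t)])
      < pvQWeight ((s, t) :: rest) := by
  obtain ⟨h1, h2⟩ := pvMidBounds h
  rw [pvQWeight_append, pvQWeight_cons, pvQWeight_cons, pvQWeight_cons, pvQWeight_nil]
  have key := pvToNatSplit h1 h2
  generalize (PySem.Int.floordiv (s + t) 2 - s).toNat = A at key ⊢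
  generalize (t - (PySem.Int.floordiv (s + t) 2 + 1)).toNat = B at key ⊢
  generalize (t - s).toNat = C at key ⊢
  omega

theorem pvDecSkip (a b : Int) (rest : List (Int × Int)) :
    pvQWeight rest < pvQWeight ((a, b) :: rest) := by
  rw [pvQWeight_cons]
  omega

-- termination measure fact for B's depth-first recursion
theorem pvDecLeft {s t : Int} (h : s < t) :
    (PySem.Int.floordiv (s + t) 2 - s).toNat < (t - s).toNat := by
  obtain ⟨h1, h2⟩ := pvMidBounds h
  omega

theorem pvDecRight {s t : Int} (h : s < t) :
    (t - (PySem.Int.floordiv (s + t) 2 + 1)).toNat < (t - s).toNat := by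
  obtain ⟨h1, h2⟩ := pvMidBounds h
  omega

-- ===== PORT A =====
-- A's loop `for start, stop in ranges:` iterates over a list that is appended to while
-- iterating; ported as a recursion on the pending queue with the result accumulator.
def interlaceGo (l : List Int) (q : List (Int × Int)) (result : List Int) : List Int :=
  match q with
  | [] => result
  | (start, stop) :: rest =>
    if hlt : start < stop then
      let middle := PySem.Int.floordiv (start + stop) 2
      interlaceGo l (rest ++ [(start, middle), (middle + 1, stop)])
        (result ++ [PySem.List.pyGetD l middle 0])
    else interlaceGo l rest result
termination_by pvQWeight q
decreasing_by
  · exact pvDecSplit rest hlt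
  · exact pvDecSkip start stop rest

-- all subscripts are in range whenever lst is nonempty (midpoints stay in [1, len-2]);
-- Pre_ excludes the empty list, where Python raises IndexError.
def interlace (lst : List Int) : List Int :=
  let l := (PySem.List.sorted lst (fun x => x) false).reverse  -- sorted(lst)[::-1]; [::-1] is reverse
  interlaceGo l [(1, (l.length : Int) - 1)] [PySem.List.pyGetD l 0 0, PySem.List.pyGetD l (-1) 0]

-- ===== PORT B =====
-- Source B's `assign(s, t, d)`: depth-first, records depth[m] = d then recurses left, right.
def assignGo (s t d : Int) (dep : PySem.Dict Int Int) : PySem.Dict Int Int :=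
  if h : s < t then
    let m := PySem.Int.floordiv (s + t) 2
    assignGo (m + 1) t (d + 1) (assignGo s m (d + 1) (dep.insert m d))
  else dep
termination_by (t - s).toNat
decreasing_by
  · exact pvDecLeft h
  · exact pvDecRight h

-- `depth[i]` in the sort key: i always is a key of the dict, so getD never takes its default.
def interlace_alt (lst : List Int) : List Int :=
  let l := (PySem.List.sorted lst (fun x => x) false).reverse  -- sorted(lst)[::-1]
  let n : Int := l.length
  let dep := assignGo 1 (n - 1) 0 PySem.Dict.empty
  (PySem.List.sorted dep.keys (fun i => dep.getD i 0 * n + i) false).foldl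
    (fun acc i => acc ++ [PySem.List.pyGetD l i 0])
    [PySem.List.pyGetD l 0 0, PySem.List.pyGetD l (-1) 0]

-- ===== PRECONDITION & SPEC =====
-- Pre_ excludes exactly the empty list, on which Python A (and B) raise IndexError at the first subscript.
def Pre_interlace (lst : List Int) : Prop := lst ≠ []
instance (lst : List Int) : Decidable (Pre_interlace lst) := by unfold Pre_interlace; infer_instance
def pvWitness_interlace : List Int := ([1, 2, 3] : List Int)

def Spec_interlace (lst : List Int) (out : List Int) : Prop := out = interlace_alt lst
instance (lst : List Int) (out : List Int) : Decidable (Spec_interlace lst out) := by unfold Spec_interlace; infer_instance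

-- ===== CLAIM (what is proved, stated in full; the proofs are below) =====
def Claim_equal_interlace : Prop := ∀ (lst : List Int), Dom_interlace lst → Pre_interlace lst → Spec_interlace lst (interlace lst)

-- ===== LEMMAS AND PROOFS =====

-- one pass over a queue/frontier: (midpoint indices emitted, child ranges), index-only
def idxStep (q : List (Int × Int)) : List Int × List (Int × Int) :=
  match q with
  | [] => ([], [])
  | (start, stop) :: rest =>
    if start < stop then
      let middle := PySem.Int.floordiv (start + stop) 2
      let p := idxStep rest
      (middle :: p.1, (start, middle) :: (middle + 1, stop) :: p.2)
    else idxStep rest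

theorem pvStepWeight (level : List (Int × Int)) :
    pvQWeight (idxStep level).2 + level.length ≤ pvQWeight level := by
  induction level with
  | nil => exact le_refl 0
  | cons p rest ih =>
    obtain ⟨s, t⟩ := p
    rw [idxStep]
    by_cases h : s < t
    · obtain ⟨h1, h2⟩ := pvMidBounds h
      rw [if_pos h, pvQWeight_cons, pvQWeight_cons, pvQWeight_cons, List.length_cons]
      have key := pvToNatSplit h1 h2
      generalize (PySem.Int.floordiv (s + t) 2 - s).toNat = A at key ⊢
      generalize (t - (PySem.Int.floordiv (s + t) 2 + 1)).toNat = B at key ⊢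
      generalize (t - s).toNat = C at key ⊢
      omega
    · rw [if_neg h, pvQWeight_cons, List.length_cons]
      generalize (t - s).toNat = C
      omega

theorem pvDecLevel (p : Int × Int) (rest : List (Int × Int)) :
    pvQWeight (idxStep (p :: rest)).2 < pvQWeight (p :: rest) := by
  have := pvStepWeight (p :: rest)
  simp only [List.length_cons] at this
  omega

-- concatenation of the emitted index lists, level by level (BFS output of A, index form)
def levels (q : List (Int × Int)) : List Int :=
  match q with
  | [] => []
  | p :: rest =>
    let s := idxStep (p :: rest)
    s.1 ++ levels s.2
termination_by pvQWeight q
decreasing_by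
  exact pvDecLevel p rest

-- the DFS (pre-order) list of (midpoint, depth) pairs — exactly what assignGo inserts
def assignList (s t d : Int) : List (Int × Int) :=
  if h : s < t then
    let m := PySem.Int.floordiv (s + t) 2
    (m, d) :: (assignList s m (d + 1) ++ assignList (m + 1) t (d + 1))
  else []
termination_by (t - s).toNat
decreasing_by
  · exact pvDecLeft h
  · exact pvDecRight h

-- the key set of assignList, independent of d
def subdiv (s t : Int) : List Int :=
  if h : s < t then
    let m := PySem.Int.floordiv (s + t) 2
    m :: (subdiv s m ++ subdiv (m + 1) t)
  else []
termination_by (t - s).toNat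
decreasing_by
  · exact pvDecLeft h
  · exact pvDecRight h

theorem assignList_keys (s t d : Int) :
    (assignList s t d).map Prod.fst = subdiv s t := by
  fun_induction assignList s t d
  case case1 h m ih1 ih2 =>
    rw [subdiv, dif_pos h]
    simp only [List.map_cons, List.map_append, ih1, ih2]
    rfl
  case case2 h => rw [subdiv, dif_neg h]; rfl

theorem mem_subdiv {s t : Int} : ∀ {i : Int}, i ∈ subdiv s t → s ≤ i ∧ i < t := by
  fun_induction subdiv s t
  case case1 h m ih1 ih2 =>
    intro i hi
    have hm := pvMidBounds h
    rcases List.mem_cons.1 hi with rfl | hi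
    · omega
    · rcases List.mem_append.1 hi with hi | hi
      · have := ih1 hi; omega
      · have := ih2 hi; omega
  case case2 h => intro i hi; simp at hi

theorem nodup_subdiv (s t : Int) : (subdiv s t).Nodup := by
  fun_induction subdiv s t
  case case1 h m ih1 ih2 =>
    have hm := pvMidBounds h
    refine List.nodup_cons.2 ⟨?_, List.Nodup.append ih1 ih2 ?_⟩
    · intro hmem
      rcases List.mem_append.1 hmem with hi | hi
      · have := mem_subdiv hi; omega
      · have := mem_subdiv hi; omega
    · intro a ha hb
      have := mem_subdiv ha; have := mem_subdiv hb; omega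
  case case2 h => exact List.nodup_nil

-- assignGo appends its fresh pairs to the dict's items
theorem assignGo_items (s t d : Int) (dep : PySem.Dict Int Int) :
    (∀ i ∈ subdiv s t, dep.contains i = false) →
    (assignGo s t d dep).items = dep.items ++ assignList s t d := by
  fun_induction assignGo s t d dep
  case case1 s t d dep h m ih1 ih1' ih2 =>
    intro hfresh
    have hsub : subdiv s t = m :: (subdiv s m ++ subdiv (m + 1) t) := by
      rw [subdiv, dif_pos h]
    rw [hsub] at hfresh
    have hm := pvMidBounds h
    have hmf : dep.contains m = false := hfresh m (List.mem_cons_self ..)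
    have h1 : (dep.insert m d).items = dep.items ++ [(m, d)] :=
      PySem.Dict.items_insert_of_not_contains dep d hmf
    have hf1 : ∀ i ∈ subdiv s m, (dep.insert m d).contains i = false := by
      intro i hi
      have hb := mem_subdiv hi
      rw [PySem.Dict.contains_insert]
      have : (i == m) = false := by simp; omega
      rw [this, hfresh i (List.mem_cons_of_mem _ (List.mem_append_left _ hi))]
      rfl
    have h2 := ih1 hf1
    have hf2 : ∀ i ∈ subdiv (m + 1) t,
        (assignGo s m (d + 1) (dep.insert m d)).contains i = false := by
      intro i hi
      have hb := mem_subdiv hi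
      by_contra hc
      have hc' : (assignGo s m (d + 1) (dep.insert m d)).contains i = true := by
        revert hc; cases (assignGo s m (d + 1) (dep.insert m d)).contains i <;> simp
      have hk := (PySem.Dict.contains_iff_mem_keys _ _).1 hc'
      simp only [PySem.Dict.keys, h2, h1, List.map_append] at hk
      rcases List.mem_append.1 hk with hk | hk
      · rcases List.mem_append.1 hk with hk | hk
        · have : dep.contains i = true := (PySem.Dict.contains_iff_mem_keys _ _).2 hk
          rw [hfresh i (List.mem_cons_of_mem _ (List.mem_append_right _ hi))] at this
          exact Bool.false_ne_true this
        · simp at hk; omega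
      · rw [assignList_keys] at hk
        have := mem_subdiv hk; omega
    have hAL : assignList s t d
        = (m, d) :: (assignList s m (d + 1) ++ assignList (m + 1) t (d + 1)) := by
      rw [assignList, dif_pos h]
    rw [ih2 hf2, h2, h1, hAL]
    simp
  case case2 s t d dep h =>
    intro _
    rw [assignList, dif_neg h]
    simp

-- interlaceGo, split at a queue prefix
theorem interlaceGo_split (l : List Int) (q r : List (Int × Int)) (result : List Int) :
    interlaceGo l (q ++ r) result
      = interlaceGo l (r ++ (idxStep q).2)
          (result ++ ((idxStep q).1.map (fun i => PySem.List.pyGetD l i 0))) := by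
  induction q generalizing r result with
  | nil => simp [idxStep]
  | cons p q' ih =>
    obtain ⟨s, t⟩ := p
    by_cases h : s < t
    · rw [List.cons_append, interlaceGo]
      simp only [h, dite_true]
      rw [List.append_assoc, ih (r ++ [(s, PySem.Int.floordiv (s + t) 2), (PySem.Int.floordiv (s + t) 2 + 1, t)])]
      simp [idxStep, h]
    · rw [List.cons_append, interlaceGo]
      simp only [h, dite_false]
      rw [ih r]
      simp [idxStep, h]

theorem pvQWeight_pos (p : Int × Int) (rest : List (Int × Int)) :
    0 < pvQWeight (p :: rest) := by
  rw [pvQWeight_cons]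
  omega

-- A's queue recursion = accumulator ++ (level-concatenated midpoints, mapped through l)
theorem interlaceGo_eq_levels (l : List Int) (n : Nat) (q : List (Int × Int)) (result : List Int)
    (hn : pvQWeight q ≤ n) :
    interlaceGo l q result = result ++ (levels q).map (fun i => PySem.List.pyGetD l i 0) := by
  induction n generalizing q result with
  | zero =>
    match q with
    | [] => rw [interlaceGo, levels]; simp
    | p :: rest => exact absurd hn (by have := pvQWeight_pos p rest; omega)
  | succ n ih =>
    match q with
    | [] => rw [interlaceGo, levels]; simp
    | p :: rest =>
      have hsplit := interlaceGo_split l (p :: rest) [] result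
      simp only [List.append_nil, List.nil_append] at hsplit
      rw [hsplit, levels]
      have hw := pvStepWeight (p :: rest)
      simp only [List.length_cons] at hw
      rw [ih _ _ (by omega)]
      simp

-- levels q is a permutation of the union of the full subdivisions of q
-- one step: the emitted midpoints plus the children's subdivisions re-assemble q's subdivisions
theorem step_perm (q : List (Int × Int)) :
    ((idxStep q).1 ++ ((idxStep q).2.flatMap (fun p => subdiv p.1 p.2))).Perm
      (q.flatMap (fun p => subdiv p.1 p.2)) := by
  induction q with
  | nil => simp [idxStep]
  | cons p rest ih =>
    obtain ⟨s, t⟩ := p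
    by_cases h : s < t
    · simp only [idxStep, if_pos h, List.flatMap_cons, List.cons_append]
      have hsub : subdiv s t
          = PySem.Int.floordiv (s + t) 2 ::
            (subdiv s (PySem.Int.floordiv (s + t) 2) ++
              subdiv (PySem.Int.floordiv (s + t) 2 + 1) t) := by
        rw [subdiv, dif_pos h]
      rw [hsub]
      refine List.Perm.cons _ ?_
      have hre :
          (idxStep rest).1 ++ (subdiv s (PySem.Int.floordiv (s + t) 2) ++
            (subdiv (PySem.Int.floordiv (s + t) 2 + 1) t ++
              ((idxStep rest).2.flatMap (fun p => subdiv p.1 p.2))))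
          = ((idxStep rest).1 ++ (subdiv s (PySem.Int.floordiv (s + t) 2) ++
              subdiv (PySem.Int.floordiv (s + t) 2 + 1) t)) ++
            ((idxStep rest).2.flatMap (fun p => subdiv p.1 p.2)) := by
        simp [List.append_assoc]
      rw [hre]
      refine List.Perm.trans (List.Perm.append_right _ List.perm_append_comm) ?_
      rw [List.append_assoc]
      exact List.Perm.append_left _ ih
    · simp only [idxStep, if_neg h, List.flatMap_cons]
      have hsub : subdiv s t = [] := by rw [subdiv, dif_neg h]
      rw [hsub]
      simpa using ih

theorem levels_perm (n : Nat) (q : List (Int × Int)) (hn : pvQWeight q ≤ n) :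
    (levels q).Perm (q.flatMap (fun p => subdiv p.1 p.2)) := by
  induction n generalizing q with
  | zero =>
    match q with
    | [] => rw [levels]; simp
    | p :: rest => exact absurd hn (by have := pvQWeight_pos p rest; omega)
  | succ n ih =>
    match q with
    | [] => rw [levels]; simp
    | p :: rest =>
      rw [levels]
      have hw := pvStepWeight (p :: rest)
      simp only [List.length_cons] at hw
      refine List.Perm.trans (List.Perm.append_left _ (ih _ (by omega))) (step_perm (p :: rest))

-- the invariant carried by A's frontier, at depth d, against B's finished dict
def Good (nn d : Int) (dep : PySem.Dict Int Int) (q : List (Int × Int)) : Prop :=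
  (∀ p ∈ q, 1 ≤ p.1 ∧ p.2 ≤ nn - 1) ∧
  q.Pairwise (fun a b => a.2 ≤ b.1) ∧
  (∀ p ∈ q, ∀ x ∈ assignList p.1 p.2 d, dep.get? x.1 = some x.2)

-- every emitted midpoint comes from a splittable range of the frontier
theorem mem_idxStep_fst {q : List (Int × Int)} {i : Int} (h : i ∈ (idxStep q).1) :
    ∃ p ∈ q, p.1 < p.2 ∧ i = PySem.Int.floordiv (p.1 + p.2) 2 := by
  induction q with
  | nil => simp [idxStep] at h
  | cons p rest ih =>
    obtain ⟨s, t⟩ := p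
    by_cases hst : s < t
    · simp only [idxStep, if_pos hst] at h
      rcases List.mem_cons.1 h with rfl | h
      · exact ⟨(s, t), List.mem_cons_self .., hst, rfl⟩
      · obtain ⟨p, hp, h1, h2⟩ := ih h
        exact ⟨p, List.mem_cons_of_mem _ hp, h1, h2⟩
    · simp only [idxStep, if_neg hst] at h
      obtain ⟨p, hp, h1, h2⟩ := ih h
      exact ⟨p, List.mem_cons_of_mem _ hp, h1, h2⟩

-- every child range is one half of a splittable range of the frontier
theorem mem_idxStep_snd {q : List (Int × Int)} {c : Int × Int} (h : c ∈ (idxStep q).2) :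
    ∃ p ∈ q, p.1 < p.2 ∧
      (c = (p.1, PySem.Int.floordiv (p.1 + p.2) 2) ∨
       c = (PySem.Int.floordiv (p.1 + p.2) 2 + 1, p.2)) := by
  induction q with
  | nil => simp [idxStep] at h
  | cons p rest ih =>
    obtain ⟨s, t⟩ := p
    by_cases hst : s < t
    · simp only [idxStep, if_pos hst] at h
      rcases List.mem_cons.1 h with rfl | h
      · exact ⟨(s, t), List.mem_cons_self .., hst, Or.inl rfl⟩
      · rcases List.mem_cons.1 h with rfl | h
        · exact ⟨(s, t), List.mem_cons_self .., hst, Or.inr rfl⟩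
        · obtain ⟨p, hp, h1, h2⟩ := ih h
          exact ⟨p, List.mem_cons_of_mem _ hp, h1, h2⟩
    · simp only [idxStep, if_neg hst] at h
      obtain ⟨p, hp, h1, h2⟩ := ih h
      exact ⟨p, List.mem_cons_of_mem _ hp, h1, h2⟩

-- ordered, splittable-only frontiers emit strictly increasing midpoints
theorem idxStep_fst_pairwise {q : List (Int × Int)}
    (hq : q.Pairwise (fun a b => a.2 ≤ b.1)) :
    (idxStep q).1.Pairwise (· < ·) := by
  induction q with
  | nil => simp [idxStep]
  | cons p rest ih =>
    obtain ⟨s, t⟩ := p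
    obtain ⟨hrel, hrest⟩ := List.pairwise_cons.1 hq
    by_cases hst : s < t
    · simp only [idxStep, if_pos hst]
      refine List.pairwise_cons.2 ⟨?_, ih hrest⟩
      intro e he
      obtain ⟨p, hp, h1, rfl⟩ := mem_idxStep_fst he
      have hm1 := pvMidBounds hst
      have hm2 := pvMidBounds h1
      have := hrel p hp
      omega
    · simp only [idxStep, if_neg hst]
      exact ih hrest

-- the children frontier stays ordered
theorem idxStep_snd_pairwise {q : List (Int × Int)}
    (hq : q.Pairwise (fun a b => a.2 ≤ b.1)) :
    (idxStep q).2.Pairwise (fun a b => a.2 ≤ b.1) := by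
  induction q with
  | nil => simp [idxStep]
  | cons p rest ih =>
    obtain ⟨s, t⟩ := p
    obtain ⟨hrel, hrest⟩ := List.pairwise_cons.1 hq
    have hnext : ∀ c ∈ (idxStep rest).2, t ≤ c.1 := by
      intro c hc
      obtain ⟨p, hp, h1, h2⟩ := mem_idxStep_snd hc
      have hm := pvMidBounds h1
      have := hrel p hp
      rcases h2 with rfl | rfl
      · show t ≤ p.1
        omega
      · show t ≤ PySem.Int.floordiv (p.1 + p.2) 2 + 1
        omega
    by_cases hst : s < t
    · simp only [idxStep, if_pos hst]
      have hm := pvMidBounds hst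
      refine List.pairwise_cons.2 ⟨?_, List.pairwise_cons.2 ⟨?_, ih hrest⟩⟩
      · intro c hc
        rcases List.mem_cons.1 hc with rfl | hc
        · show PySem.Int.floordiv (s + t) 2 ≤ PySem.Int.floordiv (s + t) 2 + 1
          omega
        · have := hnext c hc
          show PySem.Int.floordiv (s + t) 2 ≤ c.1
          omega
      · intro c hc
        have := hnext c hc
        show t ≤ c.1
        exact this
    · simp only [idxStep, if_neg hst]
      exact ih hrest


-- the head pair of a splittable range's assignList
theorem assignList_cons {s t : Int} (d : Int) (h : s < t) :
    assignList s t d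
      = (PySem.Int.floordiv (s + t) 2, d) ::
        (assignList s (PySem.Int.floordiv (s + t) 2) (d + 1) ++
          assignList (PySem.Int.floordiv (s + t) 2 + 1) t (d + 1)) := by
  rw [assignList, dif_pos h]

-- facts about the midpoints a Good frontier emits
theorem emitted_facts {nn d : Int} {dep : PySem.Dict Int Int} {q : List (Int × Int)}
    (hg : Good nn d dep q) {i : Int} (hi : i ∈ (idxStep q).1) :
    dep.get? i = some d ∧ 1 ≤ i ∧ i ≤ nn - 2 := by
  obtain ⟨hb, hp, hcons⟩ := hg
  obtain ⟨p, hpq, hlt, rfl⟩ := mem_idxStep_fst hi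
  have hm := pvMidBounds hlt
  have hmem : (PySem.Int.floordiv (p.1 + p.2) 2, d) ∈ assignList p.1 p.2 d := by
    rw [assignList_cons d hlt]
    exact List.mem_cons_self ..
  have hget := hcons p hpq _ hmem
  have hbp := hb p hpq
  exact ⟨hget, by omega, by omega⟩

-- Good is preserved when stepping to the children frontier, at depth d+1
theorem good_step {nn d : Int} {dep : PySem.Dict Int Int} {q : List (Int × Int)}
    (hg : Good nn d dep q) : Good nn (d + 1) dep (idxStep q).2 := by
  obtain ⟨hb, hp, hcons⟩ := hg
  refine ⟨?_, idxStep_snd_pairwise hp, ?_⟩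
  · intro c hc
    obtain ⟨p, hpq, hlt, hcc⟩ := mem_idxStep_snd hc
    have hm := pvMidBounds hlt
    have hbp := hb p hpq
    rcases hcc with rfl | rfl <;> constructor <;> simp <;> omega
  · intro c hc x hx
    obtain ⟨p, hpq, hlt, hcc⟩ := mem_idxStep_snd hc
    refine hcons p hpq x ?_
    rw [assignList_cons d hlt]
    rcases hcc with rfl | rfl
    · exact List.mem_cons_of_mem _ (List.mem_append_left _ hx)
    · exact List.mem_cons_of_mem _ (List.mem_append_right _ hx)

-- all midpoints emitted by a Good frontier at depth d have key d*nn + m with 1 ≤ m ≤ nn-2,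
-- and the concatenated levels are strictly increasing under the key
theorem levels_pairwise (nn : Int) (dep : PySem.Dict Int Int) (n : Nat) :
    ∀ (d : Int) (q : List (Int × Int)), pvQWeight q ≤ n → 0 ≤ nn → Good nn d dep q →
    (levels q).Pairwise (fun a b => dep.getD a 0 * nn + a < dep.getD b 0 * nn + b) ∧
    (∀ i ∈ levels q, d * nn + 1 ≤ dep.getD i 0 * nn + i) := by
  induction n with
  | zero =>
    intro d q hn h0 hg
    match q with
    | [] => rw [levels]; simp
    | p :: rest => exact absurd hn (by have := pvQWeight_pos p rest; omega)
  | succ n ih =>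
    intro d q hn h0 hg
    match q with
    | [] => rw [levels]; simp
    | p :: rest =>
      rw [levels]
      have hw := pvStepWeight (p :: rest)
      simp only [List.length_cons] at hw
      have hkey : ∀ i ∈ (idxStep (p :: rest)).1,
          dep.getD i 0 = d ∧ 1 ≤ i ∧ i ≤ nn - 2 := by
        intro i hi
        obtain ⟨hget, hb1, hb2⟩ := emitted_facts hg hi
        exact ⟨PySem.Dict.getD_of_get?_eq_some dep 0 hget, hb1, hb2⟩
      obtain ⟨ihpw, ihlo⟩ := ih (d + 1) (idxStep (p :: rest)).2 (by omega) h0 (good_step hg)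
      constructor
      · rw [List.pairwise_append]
        refine ⟨?_, ihpw, ?_⟩
        · refine List.Pairwise.imp_of_mem ?_ (idxStep_fst_pairwise hg.2.1)
          intro a b ha hb hab
          obtain ⟨hka, _, _⟩ := hkey a ha
          obtain ⟨hkb, _, _⟩ := hkey b hb
          rw [hka, hkb]
          omega
        · intro a ha b hb
          obtain ⟨hka, hka1, hka2⟩ := hkey a ha
          have hlo := ihlo b hb
          have hdist : (d + 1) * nn = d * nn + nn := by ring
          rw [hka]
          omega
      · intro i hi
        rcases List.mem_append.1 hi with hi | hi
        · obtain ⟨hki, hk1, hk2⟩ := hkey i hi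
          rw [hki]
          omega
        · have hlo := ihlo i hi
          have hdist : (d + 1) * nn = d * nn + nn := by ring
          omega

-- ===== VERDICT (by name: the statement is the Claim_ definition above) =====
-- everything assembled for the dict B builds over the full range [1, nn-1]
theorem sorted_keys_eq_levels (nn : Int) (h0 : 0 ≤ nn) :
    PySem.List.sorted (assignGo 1 (nn - 1) 0 PySem.Dict.empty).keys
      (fun i => (assignGo 1 (nn - 1) 0 PySem.Dict.empty).getD i 0 * nn + i) false
      = levels [(1, nn - 1)] := by
  have hitems : (assignGo 1 (nn - 1) 0 PySem.Dict.empty).items = assignList 1 (nn - 1) 0 := by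
    have := assignGo_items 1 (nn - 1) 0 PySem.Dict.empty
      (fun i _ => PySem.Dict.contains_empty i)
    simpa using this
  have hkeys : (assignGo 1 (nn - 1) 0 PySem.Dict.empty).keys = subdiv 1 (nn - 1) := by
    simp only [PySem.Dict.keys, hitems, assignList_keys]
  have hnodup : (assignGo 1 (nn - 1) 0 PySem.Dict.empty).keys.Nodup := by
    rw [hkeys]; exact nodup_subdiv _ _
  have hgood : Good nn 0 (assignGo 1 (nn - 1) 0 PySem.Dict.empty) [(1, nn - 1)] := by
    refine ⟨?_, ?_, ?_⟩
    · intro p hp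
      rcases List.mem_singleton.1 hp with rfl
      exact ⟨le_refl _, le_refl _⟩
    · exact List.pairwise_singleton _ _
    · intro p hp x hx
      rcases List.mem_singleton.1 hp with rfl
      obtain ⟨a, b⟩ := x
      refine PySem.Dict.get?_of_mem_items _ ?_ hnodup
      rw [hitems]
      exact hx
  have hperm : (levels [(1, nn - 1)]).Perm (assignGo 1 (nn - 1) 0 PySem.Dict.empty).keys := by
    rw [hkeys]
    have := levels_perm (pvQWeight [(1, nn - 1)]) [(1, nn - 1)] (le_refl _)
    simpa using this
  have hpw := (levels_pairwise nn (assignGo 1 (nn - 1) 0 PySem.Dict.empty)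
    (pvQWeight [(1, nn - 1)]) 0 [(1, nn - 1)] (le_refl _) h0 hgood).1
  exact PySem.List.sorted_eq_of_perm_of_pairwise_lt _ _ _ hperm hpw

theorem interlace_spec : Claim_equal_interlace := by
  intro lst _ _
  unfold Spec_interlace interlace interlace_alt
  rw [PySem.List.foldl_append_singleton_eq_map]
  rw [interlaceGo_eq_levels _
    (pvQWeight [(1, ((PySem.List.sorted lst (fun x => x) false).reverse.length : Int) - 1)])
    _ _ (le_refl _)]
  rw [sorted_keys_eq_levels _ (Int.natCast_nonneg _)]
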